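-- pv_equiv track=rewrite | github.com/danielgabor99/Projects | Artificial Intelligence/P3/Problem.py | createListOfColumns
-- ===== SOURCE A (Python) =====
-- def createListOfColumns(individual):
--     listOfCols=[]
--     col=[]
--     for i in range(0,len(individual)):
--         col=[]
--         for j in range(0,len(individual)):
--             col.append(individual[j][i][0])
--         listOfCols.append(col)
--         col=[]
--         for j in range(0,len(individual)):
--             col.append(individual[j][i][1])
--         listOfCols.append(col)
--     return listOfCols
-- ===== SOURCE B (Python) =====
-- def createListOfColumns(individual):
--     n = len(individual)
--     pairs = [([], []) for _ in range(n)]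
--     for row in individual:
--         for i in range(n):
--             x, y = row[i]
--             a, b = pairs[i]
--             pairs[i] = (a + [x], b + [y])
--     return [col for pair in pairs for col in pair]
-- ===== Notes on version B (the rewrite author's own statement) =====
-- stated objective: alternative
-- what changed: Replaces A's column-major gather (outer loop over the column index, three separate index-based inner scans per column, appending finished columns one by one) with a single row-major scatter that maintains all n (col0, col1) pairs at once and flattens them at the end.
import Mathlib
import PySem

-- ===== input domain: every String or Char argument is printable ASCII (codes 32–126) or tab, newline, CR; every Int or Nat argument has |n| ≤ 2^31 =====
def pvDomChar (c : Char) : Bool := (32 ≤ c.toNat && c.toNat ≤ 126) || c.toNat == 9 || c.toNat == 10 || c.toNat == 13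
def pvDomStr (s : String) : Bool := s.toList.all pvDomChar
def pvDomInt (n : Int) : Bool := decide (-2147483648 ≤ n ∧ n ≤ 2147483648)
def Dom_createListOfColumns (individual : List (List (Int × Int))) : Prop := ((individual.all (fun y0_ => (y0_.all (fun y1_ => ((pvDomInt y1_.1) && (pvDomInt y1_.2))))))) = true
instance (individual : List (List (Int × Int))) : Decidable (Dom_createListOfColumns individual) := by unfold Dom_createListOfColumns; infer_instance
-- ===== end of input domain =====

-- B replaces A's column-major gather (index loops per column) with a row-major scatter that
-- maintains all n (col0, col1) pairs at once and flattens them at the end; equivalence on Pre_.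

-- ===== PORT A =====
def createListOfColumns (individual : List (List (Int × Int))) : List (List Int) :=
  (PySem.List.pyRange 0 individual.length 1).foldl (fun listOfCols i =>
    let col0 := (PySem.List.pyRange 0 individual.length 1).foldl
      (fun col j => col ++ [(PySem.List.pyGetD (PySem.List.pyGetD individual j []) i (0, 0)).1]) []
    let listOfCols1 := listOfCols ++ [col0]
    let col1 := (PySem.List.pyRange 0 individual.length 1).foldl
      (fun col j => col ++ [(PySem.List.pyGetD (PySem.List.pyGetD individual j []) i (0, 0)).2]) []
    listOfCols1 ++ [col1]) []

-- ===== PORT B =====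
def createListOfColumns_alt (individual : List (List (Int × Int))) : List (List Int) :=
  let n := individual.length
  let pairs0 : List (List Int × List Int) := List.replicate n ([], [])
  let pairs := individual.foldl (fun pairs row =>
    (PySem.List.pyRange 0 n 1).foldl (fun pairs i =>
      let xy := PySem.List.pyGetD row i (0, 0)
      let ab := PySem.List.pyGetD pairs i ([], [])
      PySem.List.pySetD pairs i (ab.1 ++ [xy.1], ab.2 ++ [xy.2])) pairs) pairs0
  pairs.flatMap (fun p => [p.1, p.2])

-- ===== PRECONDITION & SPEC =====
-- Pre_ excludes exactly the inputs on which the Python raises IndexError: some row shorter than the row count.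
def Pre_createListOfColumns (individual : List (List (Int × Int))) : Prop :=
  ∀ row ∈ individual, individual.length ≤ row.length
instance (individual : List (List (Int × Int))) : Decidable (Pre_createListOfColumns individual) := by
  unfold Pre_createListOfColumns; infer_instance
def pvWitness_createListOfColumns : (List (List (Int × Int))) := [[(1, 2), (3, 4)], [(5, 6), (7, 8)]]

def Spec_createListOfColumns (individual : List (List (Int × Int))) (out : List (List Int)) : Prop := out = createListOfColumns_alt individual
instance (individual : List (List (Int × Int))) (out : List (List Int)) : Decidable (Spec_createListOfColumns individual out) := by unfold Spec_createListOfColumns; infer_instance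

-- ===== CLAIM (what is proved, stated in full; the proofs are below) =====
def Claim_equal_createListOfColumns : Prop := ∀ (individual : List (List (Int × Int))), Dom_createListOfColumns individual → Pre_createListOfColumns individual → Spec_createListOfColumns individual (createListOfColumns individual)

-- ===== LEMMAS AND PROOFS =====

-- the common interleaved-columns normal form both ports are reduced to
def pvMix (ind : List (List (Int × Int))) : List (List Int) :=
  (List.range ind.length).flatMap (fun k =>
    [ind.map (fun row => (row.getD k (0, 0)).1), ind.map (fun row => (row.getD k (0, 0)).2)])

theorem pvA_eq_mix (ind : List (List (Int × Int))) :
    createListOfColumns ind = pvMix ind := by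
  unfold createListOfColumns pvMix
  -- inner loops: index-scan over ind = map over ind
  have inner : ∀ (i : Int) (f : Int × Int → Int),
      (PySem.List.pyRange 0 ind.length 1).foldl
        (fun col j => col ++ [f (PySem.List.pyGetD (PySem.List.pyGetD ind j []) i (0, 0))]) []
      = ind.map (fun row => f (PySem.List.pyGetD row i (0, 0))) := by
    intro i f
    rw [PySem.List.foldl_pyRange_zero_pyGetD' ind []
      (fun col row => col ++ [f (PySem.List.pyGetD row i (0, 0))]) []]
    rw [PySem.List.foldl_append_singleton_eq_map]
    simp
  -- outer loop: append two singletons each step = flatMap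
  have outer :
      (PySem.List.pyRange 0 ind.length 1).foldl (fun acc i =>
        (acc ++ [ind.map (fun row => (PySem.List.pyGetD row i (0, 0)).1)]) ++
          [ind.map (fun row => (PySem.List.pyGetD row i (0, 0)).2)]) []
      = (PySem.List.pyRange 0 ind.length 1).flatMap (fun i =>
          [ind.map (fun row => (PySem.List.pyGetD row i (0, 0)).1),
           ind.map (fun row => (PySem.List.pyGetD row i (0, 0)).2)]) := by
    have := PySem.List.foldl_append_eq_flatMap
      (fun i => [ind.map (fun row => (PySem.List.pyGetD row i (0, 0)).1),
                 ind.map (fun row => (PySem.List.pyGetD row i (0, 0)).2)])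
      (PySem.List.pyRange 0 ind.length 1) ([] : List (List Int))
    simpa using this
  simp only [inner]
  rw [outer]
  rw [PySem.List.pyRange_one]
  simp [List.flatMap_map]

-- pySetD at an in-range Nat index is List.set
theorem pvSetD_natCast {α : Type} (xs : List α) (n : Nat) (v : α) (h : n < xs.length) :
    PySem.List.pySetD xs (n : Int) v = xs.set n v := by
  simp [PySem.List.pySetD, PySem.List.pySet?, PySem.List.pyIdx?, h]

-- setting index m of a range-tabulated list updates the tabulating function at m
theorem pvSet_map_range {α : Type} (n m : Nat) (q : Nat → α) (v : α) :
    ((List.range n).map q).set m v = (List.range n).map (fun k => if k = m then v else q k) := by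
  apply List.ext_getElem
  · simp
  · intro k h1 h2
    simp only [List.getElem_set, List.getElem_map, List.getElem_range]
    by_cases hk : k = m
    · simp [hk]
    · simp [hk, Ne.symm hk]

-- processing one row updates every pair, in place, with that row's entries
theorem pvRow_partial (n : Nat) (row : List (Int × Int))
    (q : Nat → List Int × List Int) (m : Nat) (hm : m ≤ n) :
    (PySem.List.pyRange 0 (m : Int) 1).foldl (fun pairs i =>
        let xy := PySem.List.pyGetD row i (0, 0)
        let ab := PySem.List.pyGetD pairs i ([], [])
        PySem.List.pySetD pairs i (ab.1 ++ [xy.1], ab.2 ++ [xy.2]))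
      ((List.range n).map q)
    = (List.range n).map (fun k => if k < m then
        ((q k).1 ++ [(row.getD k (0, 0)).1], (q k).2 ++ [(row.getD k (0, 0)).2]) else q k) := by
  induction m with
  | zero => simp [PySem.List.pyRange_one_eq_nil]
  | succ m ih =>
    have hm' : m ≤ n := Nat.le_of_succ_le hm
    have hcast : ((m + 1 : Nat) : Int) = (m : Int) + 1 := by push_cast; ring
    rw [hcast, PySem.List.pyRange_one_succ_right (by positivity), List.foldl_append, ih hm']
    have hlen : m < ((List.range n).map (fun k => if k < m then
        ((q k).1 ++ [(row.getD k (0, 0)).1], (q k).2 ++ [(row.getD k (0, 0)).2]) else q k)).length := by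
      simp; omega
    simp only [List.foldl_cons, List.foldl_nil]
    rw [PySem.List.pyGetD_natCast, PySem.List.pyGetD_natCast, pvSetD_natCast _ _ _ hlen,
      pvSet_map_range]
    have hq : ((List.range n).map (fun k => if k < m then
        ((q k).1 ++ [(row.getD k (0, 0)).1], (q k).2 ++ [(row.getD k (0, 0)).2]) else q k)).getD m
          ([], []) = q m := by
      rw [List.getD_eq_getElem _ _ (by simp; omega)]
      simp
    rw [hq]
    apply List.map_congr_left
    intro k hk
    simp only [List.mem_range] at hk
    by_cases h1 : k = m <;> by_cases h2 : k < m <;> simp [h1, h2] <;> omega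

-- the row-major fold maintains all n column pairs at once
theorem pvB_fold (rs : List (List (Int × Int))) (n : Nat)
    (h : ∀ row ∈ rs, n ≤ row.length) (q : Nat → List Int × List Int) :
    rs.foldl (fun pairs row =>
      (PySem.List.pyRange 0 (n : Int) 1).foldl (fun pairs i =>
        let xy := PySem.List.pyGetD row i (0, 0)
        let ab := PySem.List.pyGetD pairs i ([], [])
        PySem.List.pySetD pairs i (ab.1 ++ [xy.1], ab.2 ++ [xy.2])) pairs)
      ((List.range n).map q)
    = (List.range n).map (fun k =>
        ((q k).1 ++ rs.map (fun row => (row.getD k (0, 0)).1),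
         (q k).2 ++ rs.map (fun row => (row.getD k (0, 0)).2))) := by
  induction rs generalizing q with
  | nil => simp
  | cons row rs ih =>
    simp only [List.foldl_cons]
    rw [pvRow_partial n row q n le_rfl]
    have : (List.range n).map (fun k => if k < n then
        ((q k).1 ++ [(row.getD k (0, 0)).1], (q k).2 ++ [(row.getD k (0, 0)).2]) else q k)
        = (List.range n).map (fun k =>
        ((q k).1 ++ [(row.getD k (0, 0)).1], (q k).2 ++ [(row.getD k (0, 0)).2])) := by
      apply List.map_congr_left
      intro k hk
      simp only [List.mem_range] at hk
      simp [hk]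
    rw [this, ih (fun r hr => h r (by simp [hr]))
      (fun k => ((q k).1 ++ [(row.getD k (0, 0)).1], (q k).2 ++ [(row.getD k (0, 0)).2]))]
    simp

theorem pvB_eq_mix (ind : List (List (Int × Int))) (h : Pre_createListOfColumns ind) :
    createListOfColumns_alt ind = pvMix ind := by
  unfold createListOfColumns_alt pvMix
  have hrep : List.replicate ind.length (([], []) : List Int × List Int)
      = (List.range ind.length).map (fun _ => ([], [])) := by
    simp
  simp only [hrep]
  rw [pvB_fold ind ind.length h (fun _ => ([], []))]
  simp [List.flatMap_map]

-- ===== VERDICT (by name: the statement is the Claim_ definition above) =====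
theorem createListOfColumns_spec : Claim_equal_createListOfColumns := by
  intro ind _ hpre
  unfold Spec_createListOfColumns
  rw [pvA_eq_mix, pvB_eq_mix ind hpre]
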